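-- pv_equiv track=rewrite | github.com/ajmeraayam/Poker-Hand-Sorter | CompareHands.py | _check3or4OfAKind
-- ===== SOURCE A (Python) =====
-- def _check3or4OfAKind(hand):
--     seen = set()
--     seen_twice = set()
--     seen_thrice = set()
--     seen_four = set()
--
--     # For all the cards in the hand
--     for num, suit in hand:
--         # If a number is seen thrice before then it should be added to seen_four set (four of a kind)
--         if num in seen_thrice:
--             seen_four.add(num)
--         # If a number is seen twice before then it should be added to seen_thrice set (three of a kind)
--         elif num in seen_twice:
--             seen_thrice.add(num)
--         # If a number is already seen before then it has repeated and we put it in seen_twice set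
--         elif num in seen:
--             seen_twice.add(num)
--         # If a number was seen for first time then it is added to the seen set
--         else:
--             seen.add(num)
--
--     # Convert the set to list and return
--     return (list(seen_thrice), list(seen_four))
-- ===== SOURCE B (Python) =====
-- def _check3or4OfAKind(hand):
--     # Stateless staged version: list the ranks, take the distinct ones, and
--     # filter by total multiplicity (>=3 resp. >=4, so the four-of-a-kind rank
--     # also appears in the three-of-a-kind list, as in the original's cascade).
--     nums = [num for num, _suit in hand]
--     distinct = list(dict.fromkeys(nums))
--     threes = [x for x in distinct if nums.count(x) >= 3]
--     fours = [x for x in distinct if nums.count(x) >= 4]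
--     return (threes, fours)
-- ===== Notes on version B (the rewrite author's own statement) =====
-- stated objective: simpler
-- what changed: Replaces the stateful four-set cascade by a stateless staged computation: list the ranks, deduplicate once (dict.fromkeys), and build each result by filtering the distinct ranks on their total count (>=3, >=4) with list.count.
import Mathlib
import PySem

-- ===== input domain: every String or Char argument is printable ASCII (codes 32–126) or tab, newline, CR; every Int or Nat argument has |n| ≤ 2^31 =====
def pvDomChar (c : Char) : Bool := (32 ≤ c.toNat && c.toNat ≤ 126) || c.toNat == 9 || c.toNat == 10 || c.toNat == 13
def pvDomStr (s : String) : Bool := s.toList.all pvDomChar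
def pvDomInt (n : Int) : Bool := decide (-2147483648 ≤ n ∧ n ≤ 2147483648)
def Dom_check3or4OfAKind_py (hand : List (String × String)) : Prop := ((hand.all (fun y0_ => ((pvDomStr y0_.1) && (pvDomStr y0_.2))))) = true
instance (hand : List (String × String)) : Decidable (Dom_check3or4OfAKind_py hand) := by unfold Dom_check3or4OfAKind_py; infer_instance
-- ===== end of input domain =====

-- B replaces A's stateful four-set cascade by a stateless staged computation
-- (dedup the ranks once, then filter by total count ≥ 3 / ≥ 4); equivalence is
-- claimed on hands where at most one rank occurs ≥ 3 times, where A's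
-- list(set) hash-iteration order is unobservable.

-- ===== PORT A =====
-- state: (seen, seen_twice, seen_thrice, seen_four)
def pvAStep (st : PySem.Set String × PySem.Set String × PySem.Set String × PySem.Set String)
    (card : String × String) :
    PySem.Set String × PySem.Set String × PySem.Set String × PySem.Set String :=
  if st.2.2.1.contains card.1 then
    (st.1, st.2.1, st.2.2.1, PySem.Set.add st.2.2.2 card.1)
  else if st.2.1.contains card.1 then
    (st.1, st.2.1, PySem.Set.add st.2.2.1 card.1, st.2.2.2)
  else if st.1.contains card.1 then
    (st.1, PySem.Set.add st.2.1 card.1, st.2.2.1, st.2.2.2)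
  else
    (PySem.Set.add st.1 card.1, st.2.1, st.2.2.1, st.2.2.2)

def check3or4OfAKind_py (hand : List (String × String)) : List String × List String :=
  let st := hand.foldl pvAStep (PySem.Set.empty, PySem.Set.empty, PySem.Set.empty, PySem.Set.empty)
  -- list(seen_thrice), list(seen_four): the Set's element list (insertion order;
  -- Pre_ keeps these sets at ≤ 1 element, so no hash-iteration order is invented)
  (st.2.2.1, st.2.2.2)

-- ===== PORT B =====
def check3or4OfAKind_py_alt (hand : List (String × String)) : List String × List String :=
  let nums := hand.map (fun card => card.1)
  let distinct := PySem.List.dedup nums          -- list(dict.fromkeys(nums))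
  (distinct.filter (fun x => decide (3 ≤ PySem.List.count nums x)),
   distinct.filter (fun x => decide (4 ≤ PySem.List.count nums x)))

-- ===== PRECONDITION & SPEC =====
-- Pre_ excludes hands in which two or more distinct ranks occur at least three times:
-- there A returns list(set) of a multi-element set, whose order is hash-iteration
-- order (it varies with PYTHONHASHSEED), so no single value can be claimed.
def Pre_check3or4OfAKind_py (hand : List (String × String)) : Prop :=
  ((PySem.Set.ofList (hand.map Prod.fst)).filter
      (fun x => decide (3 ≤ (hand.map Prod.fst).count x))).length ≤ 1
instance (hand : List (String × String)) : Decidable (Pre_check3or4OfAKind_py hand) := by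
  unfold Pre_check3or4OfAKind_py; infer_instance

def pvWitness_check3or4OfAKind_py : (List (String × String)) :=
  [("7", "H"), ("7", "D"), ("7", "S"), ("K", "C")]

def Spec_check3or4OfAKind_py (hand : List (String × String)) (out : List String × List String) : Prop := out = check3or4OfAKind_py_alt hand
instance (hand : List (String × String)) (out : List String × List String) : Decidable (Spec_check3or4OfAKind_py hand out) := by unfold Spec_check3or4OfAKind_py; infer_instance

-- ===== CLAIM (what is proved, stated in full; the proofs are below) =====
def Claim_equal_check3or4OfAKind_py : Prop := ∀ (hand : List (String × String)), Dom_check3or4OfAKind_py hand → Pre_check3or4OfAKind_py hand → Spec_check3or4OfAKind_py hand (check3or4OfAKind_py hand)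

-- ===== LEMMAS AND PROOFS =====

-- The A-loop invariant, with `f x` = how often rank x occurred in the processed prefix.
def pvInv (f : String → Nat)
    (stA : PySem.Set String × PySem.Set String × PySem.Set String × PySem.Set String) : Prop :=
  (∀ x, x ∈ stA.1 ↔ 1 ≤ f x) ∧ (∀ x, x ∈ stA.2.1 ↔ 2 ≤ f x) ∧
  (∀ x, x ∈ stA.2.2.1 ↔ 3 ≤ f x) ∧ (∀ x, x ∈ stA.2.2.2 ↔ 4 ≤ f x) ∧
  stA.2.2.1.Nodup ∧ stA.2.2.2.Nodup

lemma pvInv_congr {f g : String → Nat} {stA} (hfg : ∀ x, f x = g x)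
    (h : pvInv f stA) : pvInv g stA := by
  obtain ⟨h1, h2, h3, h4, h5, h6⟩ := h
  exact ⟨fun x => (hfg x) ▸ h1 x, fun x => (hfg x) ▸ h2 x, fun x => (hfg x) ▸ h3 x,
    fun x => (hfg x) ▸ h4 x, h5, h6⟩

lemma pvInv_step {f : String → Nat} {stA} (card : String × String)
    (h : pvInv f stA) :
    pvInv (fun x => if x = card.1 then f x + 1 else f x) (pvAStep stA card) := by
  obtain ⟨s1, s2, s3, s4⟩ := stA
  obtain ⟨h1, h2, h3, h4, h5, h6⟩ := h
  simp only [pvAStep, PySem.Set.contains_eq_listContains, List.contains_iff_mem] at *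
  by_cases m3 : card.1 ∈ s3
  · have hf3 : 3 ≤ f card.1 := (h3 card.1).1 m3
    by_cases m4 : card.1 ∈ s4
    · simp only [m3, if_pos]
      rw [PySem.Set.add_of_mem m4]
      refine ⟨?_, ?_, ?_, ?_, h5, h6⟩ <;>
        intro x <;> by_cases hx : x = card.1 <;>
        simp [hx, h1 x, h2 x, h3 x, h4 x] <;>
        (first
          | omega
          | (rw [h1 card.1]; omega) | (rw [h2 card.1]; omega)
          | (rw [h3 card.1]; omega) | (rw [h4 card.1]; omega)
          | exact (h1 card.1).2 (by omega) | exact (h2 card.1).2 (by omega)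
          | exact (h3 card.1).2 (by omega) | exact (h4 card.1).2 (by omega)
          | (intro hh; (first | have := (h1 card.1).1 hh | have := (h2 card.1).1 hh | have := (h3 card.1).1 hh | have := (h4 card.1).1 hh); omega)
          | (constructor <;> intro _ <;> (first | omega | assumption | exact (h1 card.1).2 (by omega) | exact (h2 card.1).2 (by omega) | exact (h3 card.1).2 (by omega) | exact (h4 card.1).2 (by omega))))
    · have hf4 : ¬ 4 ≤ f card.1 := fun hh => m4 ((h4 card.1).2 hh)
      have hfe : f card.1 = 3 := by omega
      simp only [m3, if_pos]
      rw [PySem.Set.add_of_not_mem m4]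
      refine ⟨?_, ?_, ?_, ?_, h5, List.Nodup.append h6 (List.nodup_singleton _)
        (by simpa using m4)⟩ <;>
        intro x <;> by_cases hx : x = card.1 <;>
        simp [hx, h1 x, h2 x, h3 x, h4 x, hfe] <;>
        (first
          | omega
          | (rw [h1 card.1]; omega) | (rw [h2 card.1]; omega)
          | (rw [h3 card.1]; omega) | (rw [h4 card.1]; omega)
          | exact (h1 card.1).2 (by omega) | exact (h2 card.1).2 (by omega)
          | exact (h3 card.1).2 (by omega) | exact (h4 card.1).2 (by omega)
          | (intro hh; (first | have := (h1 card.1).1 hh | have := (h2 card.1).1 hh | have := (h3 card.1).1 hh | have := (h4 card.1).1 hh); omega)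
          | (constructor <;> intro _ <;> (first | omega | assumption | exact (h1 card.1).2 (by omega) | exact (h2 card.1).2 (by omega) | exact (h3 card.1).2 (by omega) | exact (h4 card.1).2 (by omega))))
  · by_cases m2 : card.1 ∈ s2
    · have hf2 : 2 ≤ f card.1 := (h2 card.1).1 m2
      have hf3 : ¬ 3 ≤ f card.1 := fun hh => m3 ((h3 card.1).2 hh)
      have hfe : f card.1 = 2 := by omega
      simp only [m3, m2, if_pos, if_false]
      rw [PySem.Set.add_of_not_mem m3]
      refine ⟨?_, ?_, ?_, ?_, List.Nodup.append h5 (List.nodup_singleton _)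
        (by simpa using m3), h6⟩ <;>
        intro x <;> by_cases hx : x = card.1 <;>
        simp [hx, h1 x, h2 x, h3 x, h4 x, hfe] <;>
        (first
          | omega
          | (rw [h1 card.1]; omega) | (rw [h2 card.1]; omega)
          | (rw [h3 card.1]; omega) | (rw [h4 card.1]; omega)
          | exact (h1 card.1).2 (by omega) | exact (h2 card.1).2 (by omega)
          | exact (h3 card.1).2 (by omega) | exact (h4 card.1).2 (by omega)
          | (intro hh; (first | have := (h1 card.1).1 hh | have := (h2 card.1).1 hh | have := (h3 card.1).1 hh | have := (h4 card.1).1 hh); omega)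
          | (constructor <;> intro _ <;> (first | omega | assumption | exact (h1 card.1).2 (by omega) | exact (h2 card.1).2 (by omega) | exact (h3 card.1).2 (by omega) | exact (h4 card.1).2 (by omega))))
    · by_cases m1 : card.1 ∈ s1
      · have hf1 : 1 ≤ f card.1 := (h1 card.1).1 m1
        have hf2 : ¬ 2 ≤ f card.1 := fun hh => m2 ((h2 card.1).2 hh)
        have hfe : f card.1 = 1 := by omega
        simp only [m3, m2, m1, if_pos, if_false]
        refine ⟨?_, ?_, ?_, ?_, h5, h6⟩ <;>
          intro x <;> by_cases hx : x = card.1 <;>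
          simp [hx, h1 x, h2 x, h3 x, h4 x, hfe, PySem.Set.mem_add] <;>
          (first
            | omega
            | (rw [h1 card.1]; omega) | (rw [h2 card.1]; omega)
            | (rw [h3 card.1]; omega) | (rw [h4 card.1]; omega)
            | (intro hh; have := (h3 card.1).1 hh; omega)
            | (intro hh; have := (h4 card.1).1 hh; omega))
      · have hf1 : ¬ 1 ≤ f card.1 := fun hh => m1 ((h1 card.1).2 hh)
        have hfe : f card.1 = 0 := by omega
        simp only [m3, m2, m1, if_false]
        refine ⟨?_, ?_, ?_, ?_, h5, h6⟩ <;>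
          intro x <;> by_cases hx : x = card.1 <;>
          simp [hx, h1 x, h2 x, h3 x, h4 x, hfe, PySem.Set.mem_add] <;>
          (first
            | omega
            | (rw [h1 card.1]; omega) | (rw [h2 card.1]; omega)
            | (rw [h3 card.1]; omega) | (rw [h4 card.1]; omega)
            | (intro hh; have := (h2 card.1).1 hh; omega)
            | (intro hh; have := (h3 card.1).1 hh; omega)
            | (intro hh; have := (h4 card.1).1 hh; omega))

lemma pvInv_foldl (hand : List (String × String)) :
    ∀ (f : String → Nat) stA, pvInv f stA →
      pvInv (fun x => f x + (hand.map Prod.fst).count x) (hand.foldl pvAStep stA) := by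
  induction hand with
  | nil => intro f stA h; simpa using h
  | cons card rest ih =>
    intro f stA h
    have h2 := ih _ _ (pvInv_step card h)
    refine pvInv_congr (fun x => ?_) h2
    by_cases hx : x = card.1
    · subst hx; simp [List.count_cons]; omega
    · have hx' : ¬ card.1 = x := fun h => hx h.symm
      simp [hx, hx', List.count_cons]

-- two nodup lists with the same members, one of length ≤ 1, are equal
lemma pv_nodup_eq {u v : List String} (hu : u.Nodup) (hv : v.Nodup)
    (hm : ∀ x, x ∈ u ↔ x ∈ v) (hl : u.length ≤ 1) : u = v := by
  match u, hl with
  | [], _ =>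
    symm
    simpa [List.eq_nil_iff_forall_not_mem] using fun x hx => (hm x).2 hx
  | [a], _ =>
    match v, (hm a).1 (by simp) with
    | b :: t, hb =>
      rcases List.mem_cons.1 hb with rfl | hbt
      · have : t = [] := by
          rw [List.eq_nil_iff_forall_not_mem]
          intro x hx
          have : x ∈ [a] := (hm x).2 (List.mem_cons_of_mem _ hx)
          simp at this
          subst this
          exact (List.nodup_cons.1 hv).1 hx
        rw [this]
      · have hba : b = a := by
          have : b ∈ [a] := (hm b).2 (by simp)
          simpa using this
        subst hba
        exact absurd hbt (List.nodup_cons.1 hv).1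

-- ===== VERDICT (by name: the statement is the Claim_ definition above) =====
theorem check3or4OfAKind_py_spec : Claim_equal_check3or4OfAKind_py := by
  intro hand _ hpre
  unfold Spec_check3or4OfAKind_py
  have h0 : pvInv (fun _ => 0)
      ((PySem.Set.empty : PySem.Set String), PySem.Set.empty, PySem.Set.empty, PySem.Set.empty) := by
    refine ⟨?_, ?_, ?_, ?_, ?_, ?_⟩ <;> simp [PySem.Set.empty]
  have hinv := pvInv_foldl hand _ _ h0
  simp only [Nat.zero_add] at hinv
  obtain ⟨_, _, h3, h4, h5, h6⟩ := hinv
  set ns := hand.map Prod.fst with hns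
  have hnseq : (hand.map (fun card => card.1)) = ns := rfl
  -- B's two lists
  have hdd : PySem.List.dedup ns = PySem.Set.ofList ns := PySem.List.dedup_eq_ofList ns
  have hcnt : ∀ x, PySem.List.count ns x = ns.count x := fun x => PySem.List.count_eq ns x
  have hwn3 : ((PySem.List.dedup ns).filter (fun x => decide (3 ≤ PySem.List.count ns x))).Nodup := by
    rw [hdd]; exact (PySem.Set.nodup_ofList ns).filter _
  have hwn4 : ((PySem.List.dedup ns).filter (fun x => decide (4 ≤ PySem.List.count ns x))).Nodup := by
    rw [hdd]; exact (PySem.Set.nodup_ofList ns).filter _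
  have hwm : ∀ (k : Nat) x, 1 ≤ k →
      (x ∈ (PySem.List.dedup ns).filter (fun y => decide (k ≤ PySem.List.count ns y)) ↔ k ≤ ns.count x) := by
    intro k x hk
    constructor
    · intro hx
      have := (List.mem_filter.1 hx).2
      simpa [hcnt x] using this
    · intro hx
      refine List.mem_filter.2 ⟨?_, by simpa [hcnt x] using hx⟩
      rw [hdd]
      exact (PySem.Set.mem_ofList ns x).2 (List.count_pos_iff.1 (by omega))
  -- lengths of A's seen_thrice / seen_four are ≤ 1 under Pre_
  have hpre' : ((PySem.Set.ofList ns).filter (fun x => decide (3 ≤ ns.count x))).length ≤ 1 := hpre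
  have hw3len : ((PySem.List.dedup ns).filter (fun x => decide (3 ≤ PySem.List.count ns x))).length ≤ 1 := by
    have : ((PySem.List.dedup ns).filter (fun x => decide (3 ≤ PySem.List.count ns x)))
        = ((PySem.Set.ofList ns).filter (fun x => decide (3 ≤ ns.count x))) := by
      rw [hdd]
      exact List.filter_congr (fun x _ => by simp [hcnt x])
    rw [this]; exact hpre'
  have hlen3 : (hand.foldl pvAStep (PySem.Set.empty, PySem.Set.empty, PySem.Set.empty, PySem.Set.empty)).2.2.1.length ≤ 1 := by
    have hmm : ∀ x, x ∈ (hand.foldl pvAStep (PySem.Set.empty, PySem.Set.empty, PySem.Set.empty, PySem.Set.empty)).2.2.1 ↔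
        x ∈ (PySem.List.dedup ns).filter (fun y => decide (3 ≤ PySem.List.count ns y)) := by
      intro x; rw [h3 x, hwm 3 x (by omega)]
    have := (List.perm_ext_iff_of_nodup h5 hwn3).2 hmm
    calc _ = _ := this.length_eq
      _ ≤ 1 := hw3len
  have hlen4 : (hand.foldl pvAStep (PySem.Set.empty, PySem.Set.empty, PySem.Set.empty, PySem.Set.empty)).2.2.2.length ≤ 1 := by
    have hsub : (hand.foldl pvAStep (PySem.Set.empty, PySem.Set.empty, PySem.Set.empty, PySem.Set.empty)).2.2.2 ⊆
        (PySem.List.dedup ns).filter (fun y => decide (3 ≤ PySem.List.count ns y)) := by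
      intro x hx
      have h4' : 4 ≤ ns.count x := (h4 x).1 hx
      exact (hwm 3 x (by omega)).2 (by omega)
    calc _ ≤ _ := (List.subperm_of_subset h6 hsub).length_le
      _ ≤ 1 := hw3len
  unfold check3or4OfAKind_py check3or4OfAKind_py_alt
  rw [hnseq]
  refine Prod.ext ?_ ?_
  · exact pv_nodup_eq h5 hwn3 (fun x => by rw [h3 x, hwm 3 x (by omega)]) hlen3
  · exact pv_nodup_eq h6 hwn4 (fun x => by rw [h4 x, hwm 4 x (by omega)]) hlen4
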